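-- pv_equiv track=rewrite | github.com/ksandrill/math | SOLE_resolver/matrix_util.py | check_dimension
-- ===== SOURCE A (Python) =====
-- from typing import List
--
-- def check_dimension(matrix: List[List[float]], vector: [float]) -> int:
--     matrix_colls: int = len(matrix)
--     if matrix_colls != len(vector):
--         return 2
--     for i in range(1, matrix_colls):
--         if len(matrix[i]) != len(matrix[i - 1]):
--             return 1
--     return 0
-- ===== SOURCE B (Python) =====
-- from typing import List
--
-- def check_dimension(matrix: List[List[float]], vector: [float]) -> int:
--     if len(matrix) != len(vector):
--         return 2
--     lengths = {len(row) for row in matrix}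
--     return 1 if len(lengths) > 1 else 0
-- ===== Notes on version B (the rewrite author's own statement) =====
-- stated objective: idiomatic
-- what changed: replaces the index-based adjacent-row-length comparison loop with building a set of all row lengths once and testing whether it holds more than one distinct length
import Mathlib
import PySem

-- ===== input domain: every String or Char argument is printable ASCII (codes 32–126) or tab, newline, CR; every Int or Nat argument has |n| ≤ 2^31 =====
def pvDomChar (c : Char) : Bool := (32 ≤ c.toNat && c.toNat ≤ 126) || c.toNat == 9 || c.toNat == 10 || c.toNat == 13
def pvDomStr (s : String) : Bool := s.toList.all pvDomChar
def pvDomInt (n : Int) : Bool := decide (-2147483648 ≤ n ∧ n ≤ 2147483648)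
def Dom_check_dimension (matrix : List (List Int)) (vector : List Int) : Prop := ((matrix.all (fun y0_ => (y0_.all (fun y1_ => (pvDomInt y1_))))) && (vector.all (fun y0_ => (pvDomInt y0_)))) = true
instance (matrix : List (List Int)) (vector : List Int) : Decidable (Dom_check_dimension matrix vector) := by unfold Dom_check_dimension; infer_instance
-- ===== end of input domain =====

-- ===== PORT A =====
-- loop over i in range(1, len(matrix)): compare len(matrix[i]) with len(matrix[i-1]), early-return 1
def check_dimension_loopA : List (List Int) → Int
  | x :: y :: rest => if (y.length : Int) ≠ (x.length : Int) then 1 else check_dimension_loopA (y :: rest)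
  | _ => 0

def check_dimension (matrix : List (List Int)) (vector : List Int) : Int :=
  if (matrix.length : Int) ≠ (vector.length : Int) then 2
  else check_dimension_loopA matrix

-- ===== PORT B =====
def check_dimension_alt (matrix : List (List Int)) (vector : List Int) : Int :=
  if (matrix.length : Int) ≠ (vector.length : Int) then 2
  else
    let lengths : PySem.Set Int := PySem.Set.ofList (matrix.map (fun row => (row.length : Int)))
    if lengths.length > 1 then 1 else 0

-- ===== PRECONDITION & SPEC =====
def Spec_check_dimension (matrix : List (List Int)) (vector : List Int) (out : Int) : Prop := out = check_dimension_alt matrix vector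
instance (matrix : List (List Int)) (vector : List Int) (out : Int) : Decidable (Spec_check_dimension matrix vector out) := by unfold Spec_check_dimension; infer_instance

-- ===== CLAIM (what is proved, stated in full; the proofs are below) =====
def Claim_equal_check_dimension : Prop := ∀ (matrix : List (List Int)) (vector : List Int), Dom_check_dimension matrix vector → Spec_check_dimension matrix vector (check_dimension matrix vector)

-- ===== LEMMAS AND PROOFS =====

-- ===== VERDICT (by name: the statement is the Claim_ definition above) =====
lemma loopA_all : ∀ (xs : List (List Int)) (a : List Int),
    check_dimension_loopA (a :: xs)
      = if (xs.map (fun r => (r.length : Int))).all (fun l => l == (a.length : Int)) then 0 else 1 := by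
  intro xs
  induction xs with
  | nil => intro a; simp [check_dimension_loopA]
  | cons y rest ih =>
    intro a
    by_cases h : (y.length : Int) = (a.length : Int)
    · simp [check_dimension_loopA, h, ih y]
    · simp [check_dimension_loopA, h]

lemma foldl_add_of_mem {s : PySem.Set Int} : ∀ (as : List Int), (∀ x ∈ as, x ∈ s) →
    as.foldl PySem.Set.add s = s := by
  intro as
  induction as generalizing s with
  | nil => intro _; rfl
  | cons b bs ih =>
    intro h
    have hb : b ∈ s := h b (by simp)
    have : PySem.Set.add s b = s := by
      simp [PySem.Set.add, PySem.Set.contains, hb]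
    rw [List.foldl_cons, this]
    exact ih (fun x hx => h x (by simp [hx]))

lemma ofList_len_le_one {a : Int} {as : List Int} (h : ∀ x ∈ as, x = a) :
    PySem.Set.ofList (a :: as) = [a] := by
  rw [PySem.Set.ofList_eq_foldl, List.foldl_cons]
  have hadd : PySem.Set.add ([] : PySem.Set Int) a = [a] := rfl
  rw [hadd]
  exact foldl_add_of_mem as (by intro x hx; simp [h x hx])

lemma ofList_len_gt_one {a b : Int} {as : List Int} (hb : b ∈ as) (hne : b ≠ a) :
    1 < (PySem.Set.ofList (a :: as)).length := by
  have ha : a ∈ PySem.Set.ofList (a :: as) := by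
    rw [PySem.Set.mem_ofList]; simp
  have hbm : b ∈ PySem.Set.ofList (a :: as) := by
    rw [PySem.Set.mem_ofList]; simp [hb]
  rcases hs : PySem.Set.ofList (a :: as) with _ | ⟨c, _ | ⟨d, t⟩⟩ <;> rw [hs] at ha hbm
  · simp at ha
  · simp at ha hbm; exact absurd (hbm.trans ha.symm) hne
  · simp

theorem check_dimension_spec : Claim_equal_check_dimension := by
  intro matrix vector _
  unfold Spec_check_dimension check_dimension check_dimension_alt
  by_cases hlen : (matrix.length : Int) = (vector.length : Int)
  · simp only [hlen, ne_eq, not_true_eq_false, if_false]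
    cases matrix with
    | nil => rfl
    | cons a xs =>
      rw [loopA_all xs a]
      by_cases hall : ∀ x ∈ xs.map (fun r => (r.length : Int)), x = (a.length : Int)
      · have h1 : PySem.Set.ofList ((a :: xs).map (fun r => (r.length : Int))) = [(a.length : Int)] :=
          ofList_len_le_one hall
        have hall2 : ((xs.map (fun r => (r.length : Int))).all (fun l => l == (a.length : Int))) = true := by
          simp only [List.all_eq_true, beq_iff_eq]; exact hall
        simp only [List.map_cons] at h1 ⊢
        simp [h1, hall2]
      · push Not at hall
        obtain ⟨b, hb, hne⟩ := hall
        have h2 := ofList_len_gt_one (a := (a.length : Int)) hb hne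
        simp only [List.map_cons] at h2 ⊢
        have hall' : ¬ ((xs.map (fun r => (r.length : Int))).all (fun l => l == (a.length : Int)) = true) := by
          simp only [List.all_eq_true, beq_iff_eq]
          push Not
          exact ⟨b, hb, hne⟩
        simp [hall', h2]
  · simp [hlen]
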